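-- pv_equiv track=rewrite | github.com/phoenixwade/AutoForge | src/autoforge/gradio_ui.py | _group_labels_by_type
-- ===== SOURCE A (Python) =====
-- def _row_label(row: dict[str, str]) -> str:
--     name = row.get("Name", "").strip()
--     color = row.get("Color", "").strip()
--     brand = row.get("Brand", "").strip()
--     mat_type = row.get("Type", "").strip()
--     return f"{name} ({color}) - {brand} {mat_type}".strip()
--
-- def _material_family(material_type: str) -> str:
--     t = (material_type or "").strip().upper()
--     if t.startswith("PLA"):
--         return "PLA Family"
--     if t == "PETG":
--         return "PETG"
--     return t or "Unknown"
--
-- def _group_labels_by_type(rows: list[dict[str, str]]) -> dict[str, list[str]]: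
--     grouped: dict[str, list[str]] = {}
--     for row in rows:
--         family = _material_family(row.get("Type", ""))
--         grouped.setdefault(family, []).append(_row_label(row))
--     for family in grouped:
--         grouped[family] = sorted(grouped[family])
--     return dict(sorted(grouped.items(), key=lambda kv: kv[0]))
-- ===== SOURCE B (Python) =====
-- def _row_label(row: dict[str, str]) -> str:
--     name = row.get("Name", "").strip()
--     color = row.get("Color", "").strip()
--     brand = row.get("Brand", "").strip()
--     mat_type = row.get("Type", "").strip()
--     return f"{name} ({color}) - {brand} {mat_type}".strip()
--
-- def _material_family(material_type: str) -> str: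
--     t = (material_type or "").strip().upper()
--     if t.startswith("PLA"):
--         return "PLA Family"
--     if t == "PETG":
--         return "PETG"
--     return t or "Unknown"
--
-- def _group_labels_by_type(rows: list[dict[str, str]]) -> dict[str, list[str]]:
--     # Sort (family, label) pairs once by the full tuple, then one linear scan
--     # bunches consecutive equal families: no dict of buckets, no per-bucket sort.
--     pairs = sorted((_material_family(row.get("Type", "")), _row_label(row)) for row in rows)
--     items: list[tuple[str, list[str]]] = []
--     for family, label in pairs:
--         if items and items[-1][0] == family:
--             items[-1][1].append(label)
--         else:
--             items.append((family, [label]))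
--     return {family: labels for family, labels in items}
-- ===== Notes on version B (the rewrite author's own statement) =====
-- stated objective: alternative
-- what changed: A buckets labels into a dict and then sorts every bucket and the key list; B instead sorts the (family, label) pairs once by the full tuple and makes a single linear scan that bunches consecutive equal families, so no per-bucket sorting or final key sort is needed.
import Mathlib
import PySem

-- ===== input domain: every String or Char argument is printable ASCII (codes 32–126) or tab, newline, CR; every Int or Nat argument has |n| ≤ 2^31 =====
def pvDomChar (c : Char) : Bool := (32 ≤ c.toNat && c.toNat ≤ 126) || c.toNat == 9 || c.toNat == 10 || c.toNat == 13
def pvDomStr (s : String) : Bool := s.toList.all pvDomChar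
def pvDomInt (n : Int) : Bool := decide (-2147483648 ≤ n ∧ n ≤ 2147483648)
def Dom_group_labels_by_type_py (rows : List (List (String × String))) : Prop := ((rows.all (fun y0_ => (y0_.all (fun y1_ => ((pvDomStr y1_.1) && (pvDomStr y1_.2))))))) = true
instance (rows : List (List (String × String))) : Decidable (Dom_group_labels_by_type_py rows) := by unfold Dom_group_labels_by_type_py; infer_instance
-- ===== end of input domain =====

-- B replaces A's dict of buckets (with a sort of every bucket and a final key sort) by one
-- lexicographic sort of all (family, label) pairs followed by a single scan that bunches
-- consecutive equal families (alternative decomposition, same overall cost).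

-- shared module helpers (_row_label and _material_family), called by both Pythons unchanged
def rowLabel (row : List (String × String)) : String :=
  let name := PySem.Str.strip ((PySem.Dict.mk row).getD "Name" "")
  let color := PySem.Str.strip ((PySem.Dict.mk row).getD "Color" "")
  let brand := PySem.Str.strip ((PySem.Dict.mk row).getD "Brand" "")
  let matType := PySem.Str.strip ((PySem.Dict.mk row).getD "Type" "")
  PySem.Str.strip (PySem.Str.join "" [name, " (", color, ") - ", brand, " ", matType])

def materialFamily (materialType : String) : String :=
  -- (material_type or "") on a str is the string itself when nonempty, "" when empty
  let t := PySem.Str.upper (PySem.Str.strip (if materialType == "" then "" else materialType))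
  if PySem.Str.startswith t "PLA" then "PLA Family"
  else if t == "PETG" then "PETG"
  else if t == "" then "Unknown" else t   -- t or "Unknown"

def rowFamily (row : List (String × String)) : String :=
  materialFamily ((PySem.Dict.mk row).getD "Type" "")

-- ===== PORT A =====
def group_labels_by_type_py (rows : List (List (String × String))) : List (String × List String) :=
  -- grouped.setdefault(family, []).append(label)  =  modify with default []
  let grouped : PySem.Dict String (List String) :=
    rows.foldl (fun d row => d.modify (rowFamily row) [] (fun v => v ++ [rowLabel row])) (PySem.Dict.mk [])
  -- 'for family in grouped: grouped[family] = sorted(grouped[family])' replaces each value in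
  -- place, keeping the dict order: rendered as a map over the items
  let sortedItems := grouped.items.map (fun kv => (kv.1, PySem.List.sorted kv.2 (fun x => x)))
  -- dict(sorted(items, key=kv[0])): keys are distinct, so the dict is the sorted item list itself
  PySem.List.sorted sortedItems (fun kv => kv.1)

-- ===== PORT B =====
-- 'if items and items[-1][0] == family: items[-1][1].append(label) else: items.append(...)'
def buildStep (items : List (String × List String)) (p : String × String) : List (String × List String) :=
  match items.getLast? with
  | some last => if last.1 == p.1 then items.dropLast ++ [(last.1, last.2 ++ [p.2])]
                 else items ++ [(p.1, [p.2])]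
  | none => [(p.1, [p.2])]

def group_labels_by_type_py_alt (rows : List (List (String × String))) : List (String × List String) :=
  -- pairs = sorted((family, label) for row in rows): one lexicographic sort by the full tuple
  let pairs := PySem.List.sorted2 (rows.map (fun row => (rowFamily row, rowLabel row))) Prod.fst Prod.snd
  -- one scan bunching consecutive equal families, then the final dict comprehension
  (PySem.Dict.ofList (pairs.foldl buildStep [])).items

-- ===== PRECONDITION & SPEC =====
def Spec_group_labels_by_type_py (rows : List (List (String × String))) (out : List (String × List String)) : Prop := out = group_labels_by_type_py_alt rows
instance (rows : List (List (String × String))) (out : List (String × List String)) : Decidable (Spec_group_labels_by_type_py rows out) := by unfold Spec_group_labels_by_type_py; infer_instance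

-- ===== CLAIM (what is proved, stated in full; the proofs are below) =====
def Claim_equal_group_labels_by_type_py : Prop := ∀ (rows : List (List (String × String))), Dom_group_labels_by_type_py rows → Spec_group_labels_by_type_py rows (group_labels_by_type_py rows)

-- ===== LEMMAS AND PROOFS =====

-- ---------- A's side: the grouping dict characterised (keys, key nodup, buckets) ----------
theorem grouped_eq (rows : List (List (String × String))) :
    rows.foldl (fun d row => d.modify (rowFamily row) [] (fun v => v ++ [rowLabel row])) (PySem.Dict.mk []) =
    (rows.map (fun r => (rowFamily r, rowLabel r))).foldl
      (fun d p => d.modify p.1 [] (fun v => v ++ [p.2])) (PySem.Dict.mk []) := by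
  rw [List.foldl_map]

theorem keys_grouped (rows : List (List (String × String))) :
    (rows.foldl (fun d row => d.modify (rowFamily row) [] (fun v => v ++ [rowLabel row]))
      (PySem.Dict.mk ([] : List (String × List String)))).keys
      = PySem.Set.ofList (rows.map rowFamily) := by
  have := PySem.Dict.keys_foldl_modify_key rows rowFamily ([] : List String)
    (fun _ row v => v ++ [rowLabel row]) (PySem.Dict.mk [])
  simpa [PySem.Set.ofList_eq_foldl, PySem.Set.update] using this

theorem nodup_keys_grouped (rows : List (List (String × String))) :
    (rows.foldl (fun d row => d.modify (rowFamily row) [] (fun v => v ++ [rowLabel row]))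
      (PySem.Dict.mk ([] : List (String × List String)))).keys.Nodup := by
  exact PySem.Dict.nodup_keys_foldl_modify_key rows rowFamily ([] : List String)
    (fun _ row v => v ++ [rowLabel row]) (PySem.Dict.mk []) (by simp [PySem.Dict.keys])

theorem getD_grouped (rows : List (List (String × String))) (k : String) :
    (rows.foldl (fun d row => d.modify (rowFamily row) [] (fun v => v ++ [rowLabel row]))
      (PySem.Dict.mk ([] : List (String × List String)))).getD k []
      = (rows.filter (fun r => rowFamily r == k)).map rowLabel := by
  rw [grouped_eq]
  rw [PySem.Dict.getD_foldl_modify_append]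
  simp [List.filter_map, Function.comp_def, PySem.Dict.getD, PySem.Dict.get?]

-- A's result in closed form: sorted family set, each family with its sorted labels
theorem A_closed (rows : List (List (String × String))) :
    group_labels_by_type_py rows
      = (PySem.List.sorted (PySem.Set.ofList (rows.map rowFamily)) (fun x => x)).map
          (fun f => (f, PySem.List.sorted ((rows.filter (fun r => rowFamily r == f)).map rowLabel) (fun x => x))) := by
  unfold group_labels_by_type_py
  have hitems := PySem.Dict.items_eq_map_keys
    (rows.foldl (fun d row => d.modify (rowFamily row) [] (fun v => v ++ [rowLabel row]))
      (PySem.Dict.mk ([] : List (String × List String)))) (nodup_keys_grouped rows) []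
  dsimp only
  rw [hitems, keys_grouped]
  simp only [List.map_map, Function.comp_def, getD_grouped]
  refine PySem.List.sorted_eq_of_perm_of_pairwise_lt _ _ _ ?_ ?_
  · exact List.Perm.map _ (PySem.List.sorted_perm _ _ _)
  · exact List.Pairwise.map _ (fun a b hab => hab)
      (PySem.List.sorted_ofList_pairwise_lt (rows.map rowFamily))

-- ---------- the lexicographic order sorted2 establishes ----------
def lexLE (a b : String × String) : Prop := a.1 < b.1 ∨ (a.1 = b.1 ∧ a.2 ≤ b.2)

def lexB (a b : String × String) : Bool :=
  decide (a.1 < b.1) || (!decide (b.1 < a.1) && decide (a.2 < b.2))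

theorem lexLE_trans {a b c : String × String} (h1 : lexLE a b) (h2 : lexLE b c) : lexLE a c := by
  rcases h1 with h1 | ⟨h1, h1'⟩ <;> rcases h2 with h2 | ⟨h2, h2'⟩
  · exact Or.inl (lt_trans h1 h2)
  · exact Or.inl (h2 ▸ h1)
  · exact Or.inl (h1 ▸ h2)
  · exact Or.inr ⟨h1.trans h2, le_trans h1' h2'⟩

theorem lexB_iff (a b : String × String) :
    lexB a b = true ↔ (a.1 < b.1 ∨ (¬ b.1 < a.1 ∧ a.2 < b.2)) := by
  simp only [lexB, Bool.or_eq_true, Bool.and_eq_true, Bool.not_eq_true',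
    decide_eq_false_iff_not, decide_eq_true_eq]

theorem lexB_true {a b : String × String} (h : lexB a b = true) : lexLE a b := by
  rcases (lexB_iff a b).1 h with h1 | ⟨h2, h3⟩
  · exact Or.inl h1
  · by_cases h1 : a.1 < b.1
    · exact Or.inl h1
    · exact Or.inr ⟨le_antisymm (not_lt.1 h2) (not_lt.1 h1), le_of_lt h3⟩

theorem lexB_false {a b : String × String} (h : lexB a b = false) : lexLE b a := by
  have h' : ¬ (a.1 < b.1 ∨ (¬ b.1 < a.1 ∧ a.2 < b.2)) := by
    rw [← lexB_iff, h]; exact Bool.false_ne_true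
  have hA : ¬ a.1 < b.1 := fun hc => h' (Or.inl hc)
  by_cases h2 : b.1 < a.1
  · exact Or.inl h2
  · have hR : ¬ a.2 < b.2 := fun hc => h' (Or.inr ⟨h2, hc⟩)
    exact Or.inr ⟨le_antisymm (not_lt.1 hA) (not_lt.1 h2), not_lt.1 hR⟩

theorem pairwise_insertBy (x : String × String) (l : List (String × String))
    (h : l.Pairwise lexLE) : (PySem.List.insertBy lexB x l).Pairwise lexLE := by
  induction l with
  | nil => simp [PySem.List.insertBy]
  | cons y ys ih =>
    rcases List.pairwise_cons.1 h with ⟨hy, hys⟩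
    by_cases hb : lexB x y = true
    · simp only [PySem.List.insertBy, hb, if_true]
      refine List.pairwise_cons.2 ⟨?_, h⟩
      intro z hz
      rcases List.mem_cons.1 hz with rfl | hz
      · exact lexB_true hb
      · exact lexLE_trans (lexB_true hb) (hy z hz)
    · simp only [PySem.List.insertBy, hb]
      refine List.pairwise_cons.2 ⟨?_, ih hys⟩
      intro z hz
      rcases (PySem.List.mem_insertBy lexB x z ys).1 hz with rfl | hz
      · exact lexB_false (by simpa using hb)
      · exact hy z hz

theorem pairwise_foldl_insertBy (xs : List (String × String)) :
    ∀ acc : List (String × String), acc.Pairwise lexLE →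
      (xs.foldl (fun acc x => PySem.List.insertBy lexB x acc) acc).Pairwise lexLE := by
  induction xs with
  | nil => intro acc h; simpa using h
  | cons x xs ih => intro acc h; exact ih _ (pairwise_insertBy x acc h)

theorem sorted2_eq (xs : List (String × String)) :
    PySem.List.sorted2 xs Prod.fst Prod.snd
      = xs.foldl (fun acc x => PySem.List.insertBy lexB x acc) [] := rfl

theorem pairwise_sorted2 (xs : List (String × String)) :
    (PySem.List.sorted2 xs Prod.fst Prod.snd).Pairwise lexLE := by
  rw [sorted2_eq]
  exact pairwise_foldl_insertBy xs [] (by simp)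

-- ---------- B's scan characterised ----------
-- R f ls qs: the scan's remaining work with open bucket (f, ls)
def R (f : String) (ls : List String) : List (String × String) → List (String × List String)
  | [] => [(f, ls)]
  | q :: qs => if q.1 = f then R f (ls ++ [q.2]) qs else (f, ls) :: R q.1 [q.2] qs

def G : List (String × String) → List (String × List String)
  | [] => []
  | q :: qs => R q.1 [q.2] qs

theorem foldl_buildStep (qs : List (String × String)) :
    ∀ (g : List (String × List String)) (f : String) (ls : List String),
      qs.foldl buildStep (g ++ [(f, ls)]) = g ++ R f ls qs := by
  induction qs with
  | nil => intro g f ls; simp [R]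
  | cons q qs ih =>
    intro g f ls
    by_cases h : q.1 = f
    · simp only [List.foldl_cons, buildStep, List.getLast?_concat, List.dropLast_concat,
        R, h, if_true]
      simp only [beq_self_eq_true, if_true]
      exact ih g f (ls ++ [q.2])
    · simp only [List.foldl_cons, buildStep, List.getLast?_concat, List.dropLast_concat,
        R, h, if_false]
      have : (f == q.1) = false := by
        rw [beq_eq_false_iff_ne]; exact fun e => h (Eq.symm e)
      simp only [this, Bool.false_eq_true, if_false]
      have := ih (g ++ [(f, ls)]) q.1 [q.2]
      simpa [List.append_assoc] using this

theorem foldl_buildStep_nil (qs : List (String × String)) :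
    qs.foldl buildStep [] = G qs := by
  cases qs with
  | nil => rfl
  | cons q qs =>
    have : qs.foldl buildStep (([] : List (String × List String)) ++ [(q.1, [q.2])])
        = [] ++ R q.1 [q.2] qs := foldl_buildStep qs [] q.1 [q.2]
    simpa [buildStep, G] using this

-- fst of any group of R f ls qs is f or a fst of qs
theorem R_fst_mem (qs : List (String × String)) :
    ∀ (f : String) (ls : List String) (g : String),
      g ∈ (R f ls qs).map Prod.fst → g = f ∨ g ∈ qs.map Prod.fst := by
  induction qs with
  | nil => intro f ls g hg; simp [R] at hg; exact Or.inl hg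
  | cons q qs ih =>
    intro f ls g hg
    by_cases h : q.1 = f
    · simp only [R, h, if_true] at hg
      rcases ih f (ls ++ [q.2]) g hg with rfl | hm
      · exact Or.inl rfl
      · exact Or.inr (by rw [List.map_cons]; exact List.mem_cons.2 (Or.inr hm))
    · simp only [R, h, if_false, List.map_cons, List.mem_cons] at hg
      rcases hg with rfl | hg
      · exact Or.inl rfl
      · rcases ih q.1 [q.2] g hg with rfl | hm
        · exact Or.inr (by simp)
        · exact Or.inr (by rw [List.map_cons]; exact List.mem_cons.2 (Or.inr hm))

theorem R_fst_self (qs : List (String × String)) :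
    ∀ (f : String) (ls : List String), f ∈ (R f ls qs).map Prod.fst := by
  induction qs with
  | nil => intro f ls; simp [R]
  | cons q qs ih =>
    intro f ls
    by_cases h : q.1 = f
    · simp only [R, h, if_true]; exact ih f (ls ++ [q.2])
    · simp [R, h]

theorem R_fst_of_mem (qs : List (String × String)) :
    ∀ (f : String) (ls : List String) (g : String),
      g ∈ qs.map Prod.fst → g ∈ (R f ls qs).map Prod.fst := by
  induction qs with
  | nil => intro f ls g hg; simp at hg
  | cons q qs ih =>
    intro f ls g hg
    rw [List.map_cons] at hg
    rcases List.mem_cons.1 hg with rfl | hg'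
    · by_cases h : q.1 = f
      · simp only [R, h, if_true]; exact h ▸ R_fst_self qs f (ls ++ [q.2])
      · simp only [R, h, if_false, List.map_cons, List.mem_cons]
        exact Or.inr (R_fst_self qs q.1 [q.2])
    · by_cases h : q.1 = f
      · simp only [R, h, if_true]; exact ih f (ls ++ [q.2]) g hg'
      · simp only [R, h, if_false, List.map_cons, List.mem_cons]
        exact Or.inr (ih q.1 [q.2] g hg')

theorem R_pairwise_fst (qs : List (String × String)) :
    ∀ (f : String) (ls : List String), qs.Pairwise lexLE → (∀ q ∈ qs, f ≤ q.1) →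
      ((R f ls qs).map Prod.fst).Pairwise (· < ·) := by
  induction qs with
  | nil => intro f ls _ _; simp [R]
  | cons q qs ih =>
    intro f ls hpw hall
    rcases List.pairwise_cons.1 hpw with ⟨hq, hqs⟩
    by_cases h : q.1 = f
    · simp only [R, h, if_true]
      refine ih f (ls ++ [q.2]) hqs ?_
      intro q' hq'
      have : lexLE q q' := hq q' hq'
      rcases this with hlt | ⟨heq, _⟩
      · exact h ▸ le_of_lt hlt
      · exact h ▸ le_of_eq heq
    · have hflt : f < q.1 := lt_of_le_of_ne (hall q (by simp)) (fun e => h e.symm)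
      simp only [R, h, if_false, List.map_cons]
      refine List.pairwise_cons.2 ⟨?_, ?_⟩
      · intro g hg
        rcases R_fst_mem qs q.1 [q.2] g hg with rfl | hm
        · exact hflt
        · rcases List.mem_map.1 hm with ⟨q', hq', rfl⟩
          have : lexLE q q' := hq q' hq'
          rcases this with hlt | ⟨heq, _⟩
          · exact lt_trans hflt hlt
          · exact heq ▸ hflt
      · refine ih q.1 [q.2] hqs ?_
        intro q' hq'
        rcases hq q' hq' with hlt | ⟨heq, _⟩
        · exact le_of_lt hlt
        · exact le_of_eq heq

theorem R_bucket (qs : List (String × String)) :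
    ∀ (f : String) (ls : List String) (g : String) (lsg : List String),
      qs.Pairwise lexLE → (∀ q ∈ qs, f ≤ q.1) → (g, lsg) ∈ R f ls qs →
      lsg = (if g = f then ls else []) ++ (qs.filter (fun q => q.1 == g)).map Prod.snd := by
  induction qs with
  | nil =>
    intro f ls g lsg _ _ hmem
    simp [R] at hmem
    simp [hmem.1, hmem.2]
  | cons q qs ih =>
    intro f ls g lsg hpw hall hmem
    rcases List.pairwise_cons.1 hpw with ⟨hq, hqs⟩
    have hqle : ∀ q' ∈ qs, q.1 ≤ q'.1 := by
      intro q' hq'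
      rcases hq q' hq' with hlt | ⟨heq, _⟩
      · exact le_of_lt hlt
      · exact le_of_eq heq
    by_cases h : q.1 = f
    · simp only [R, h, if_true] at hmem
      have := ih f (ls ++ [q.2]) g lsg hqs (fun q' hq' => h ▸ hqle q' hq') hmem
      by_cases hg : g = f
      · have hfq : (q.1 == g) = true := by simp [h, hg]
        simp only [hg, if_true] at this ⊢
        simp [this, h, List.append_assoc]
      · have hfq : (q.1 == g) = false := by
          rw [h, beq_eq_false_iff_ne]; exact fun e => hg (Eq.symm e)
        simp only [hg, if_false] at this ⊢
        simp [hfq, this]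
    · have hflt : f < q.1 := lt_of_le_of_ne (hall q (by simp)) (fun e => h e.symm)
      simp only [R, h, if_false, List.mem_cons] at hmem
      rcases hmem with heq | hmem
      · have hg : g = f := congrArg Prod.fst heq
        have hls : lsg = ls := congrArg Prod.snd heq
        -- no element of q :: qs has fst f, since f < q.1 ≤ every later fst
        have hfilt : ((q :: qs).filter (fun q' => q'.1 == g)).map Prod.snd = [] := by
          rw [List.map_eq_nil_iff, List.filter_eq_nil_iff]
          intro q' hq'
          rcases List.mem_cons.1 hq' with rfl | hq''
          · simp only [hg, beq_iff_eq]
            exact fun e => absurd (Eq.symm e) (ne_of_lt hflt)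
          · have hle : q.1 ≤ q'.1 := hqle q' hq''
            simp only [hg, beq_iff_eq]
            exact fun e => absurd (e ▸ hle) (not_le.2 hflt)
        rw [hfilt, hg, hls]; simp
      · have := ih q.1 [q.2] g lsg hqs hqle hmem
        -- g is q.1 or some later fst, hence f < g, so g ≠ f
        have hgin : g = q.1 ∨ g ∈ qs.map Prod.fst :=
          R_fst_mem qs q.1 [q.2] g (List.mem_map.2 ⟨(g, lsg), hmem, rfl⟩)
        have hgq : q.1 ≤ g := by
          rcases hgin with rfl | hm
          · exact le_refl _
          · rcases List.mem_map.1 hm with ⟨q', hq', rfl⟩; exact hqle q' hq'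
        have hgf : g ≠ f := fun e => absurd (e ▸ hgq) (not_le.2 hflt)
        simp only [hgf, if_false] at this ⊢
        by_cases hgq1 : g = q.1
        · have hb : (q.1 == g) = true := by simp [hgq1]
          simp only [hgq1, if_true] at this
          simp [this, hgq1]
        · have hb : (q.1 == g) = false := by
            rw [beq_eq_false_iff_ne]; exact fun e => hgq1 (Eq.symm e)
          simp only [hgq1, if_false] at this
          simp [hb, this]

-- the three facts about G on a lex-sorted list
theorem G_pairwise_fst (qs : List (String × String)) (hpw : qs.Pairwise lexLE) :
    ((G qs).map Prod.fst).Pairwise (· < ·) := by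
  cases qs with
  | nil => simp [G]
  | cons q qs =>
    rcases List.pairwise_cons.1 hpw with ⟨hq, hqs⟩
    refine R_pairwise_fst qs q.1 [q.2] hqs ?_
    intro q' hq'
    rcases hq q' hq' with hlt | ⟨heq, _⟩
    · exact le_of_lt hlt
    · exact le_of_eq heq

theorem G_fst_iff (qs : List (String × String)) (g : String) :
    g ∈ (G qs).map Prod.fst ↔ g ∈ qs.map Prod.fst := by
  cases qs with
  | nil => simp [G]
  | cons q qs =>
    constructor
    · intro hg
      rcases R_fst_mem qs q.1 [q.2] g hg with rfl | hm
      · simp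
      · simpa using Or.inr hm
    · intro hg
      rw [List.map_cons] at hg
      rcases List.mem_cons.1 hg with rfl | hg'
      · exact R_fst_self qs q.1 [q.2]
      · exact R_fst_of_mem qs q.1 [q.2] g hg' 

theorem G_bucket (qs : List (String × String)) (hpw : qs.Pairwise lexLE)
    (g : String) (lsg : List String) (hmem : (g, lsg) ∈ G qs) :
    lsg = (qs.filter (fun q => q.1 == g)).map Prod.snd := by
  cases qs with
  | nil => simp [G] at hmem
  | cons q qs =>
    rcases List.pairwise_cons.1 hpw with ⟨hq, hqs⟩
    have hqle : ∀ q' ∈ qs, q.1 ≤ q'.1 := by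
      intro q' hq'
      rcases hq q' hq' with hlt | ⟨heq, _⟩
      · exact le_of_lt hlt
      · exact le_of_eq heq
    have := R_bucket qs q.1 [q.2] g lsg hqs hqle hmem
    by_cases hg : g = q.1
    · have hb : (q.1 == g) = true := by simp [hg]
      simp only [hg, if_true] at this
      simp [this, hg]
    · have hb : (q.1 == g) = false := by
        rw [beq_eq_false_iff_ne]; exact fun e => hg (Eq.symm e)
      simp only [hg, if_false] at this
      simp [hb, this]

-- B's result is G of the lex-sorted pair list
theorem B_closed (rows : List (List (String × String))) :
    group_labels_by_type_py_alt rows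
      = G (PySem.List.sorted2 (rows.map (fun row => (rowFamily row, rowLabel row))) Prod.fst Prod.snd) := by
  unfold group_labels_by_type_py_alt
  set qs := PySem.List.sorted2 (rows.map (fun row => (rowFamily row, rowLabel row))) Prod.fst Prod.snd with hqs
  have hpw : qs.Pairwise lexLE := pairwise_sorted2 _
  show (PySem.Dict.ofList (qs.foldl buildStep [])).items = G qs
  rw [foldl_buildStep_nil]
  have hnd : ((G qs).map Prod.fst).Nodup :=
    (G_pairwise_fst qs hpw).imp (fun h => ne_of_lt h)
  rw [PySem.Dict.ofList, PySem.Dict.update]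
  rw [PySem.Dict.items_foldl_insert_fresh (G qs) Prod.fst Prod.snd PySem.Dict.empty
        (fun a _ => by simp [PySem.Dict.contains_empty]) hnd]
  simp [PySem.Dict.empty]

-- ===== VERDICT (by name: the statement is the Claim_ definition above) =====
theorem group_labels_by_type_py_spec : Claim_equal_group_labels_by_type_py := by
  intro rows _
  unfold Spec_group_labels_by_type_py
  rw [A_closed, B_closed]
  set ps := rows.map (fun row => (rowFamily row, rowLabel row)) with hps
  set qs := PySem.List.sorted2 ps Prod.fst Prod.snd with hqs
  have hpw : qs.Pairwise lexLE := pairwise_sorted2 ps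
  have hperm : qs.Perm ps := PySem.List.sorted2_perm ps Prod.fst Prod.snd false
  have hfams : rows.map rowFamily = ps.map Prod.fst := by
    simp [hps, List.map_map, Function.comp_def]
  have hbucket : ∀ f : String,
      (rows.filter (fun r => rowFamily r == f)).map rowLabel
        = (ps.filter (fun q => q.1 == f)).map Prod.snd := by
    intro f
    simp [hps, List.filter_map, List.map_map, Function.comp_def]
  -- the spine: sorted family set = the fst projection of G qs
  have hspine : PySem.List.sorted (PySem.Set.ofList (ps.map Prod.fst)) (fun x => x)
      = (G qs).map Prod.fst := by
    refine PySem.List.sorted_eq_of_perm_of_pairwise_lt _ _ _ ?_ (G_pairwise_fst qs hpw)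
    refine (List.perm_ext_iff_of_nodup
        ((G_pairwise_fst qs hpw).imp (fun h => ne_of_lt h))
        (PySem.Set.nodup_ofList _)).2 ?_
    intro a
    rw [G_fst_iff, PySem.Set.mem_ofList]
    exact (hperm.map Prod.fst).mem_iff
  rw [hfams]
  simp only [hbucket]
  rw [hspine, List.map_map]
  -- each group of G qs is already its own sorted bucket
  have hid : ∀ p ∈ G qs,
      ((fun f => (f, PySem.List.sorted ((ps.filter (fun q => q.1 == f)).map Prod.snd) (fun x => x)))
        ∘ Prod.fst) p = p := by
    rintro ⟨g, lsg⟩ hp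
    have hbf := G_bucket qs hpw g lsg hp
    have hsorted : PySem.List.sorted ((ps.filter (fun q => q.1 == g)).map Prod.snd) (fun x => x)
        = (qs.filter (fun q => q.1 == g)).map Prod.snd := by
      refine PySem.List.sorted_id_eq_of_perm_of_pairwise _ _ ?_ ?_
      · exact (hperm.filter _).map Prod.snd
      · have h1 : (qs.filter (fun q => q.1 == g)).Pairwise
            (fun a b => a.2 ≤ b.2) := by
          refine List.Pairwise.imp_of_mem ?_ (hpw.filter _)
          intro a b ha hb hab
          have ha' : a.1 = g := by simpa using (List.mem_filter.1 ha).2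
          have hb' : b.1 = g := by simpa using (List.mem_filter.1 hb).2
          rcases hab with hlt | ⟨_, hle⟩
          · exact absurd hlt (by rw [ha', hb']; exact lt_irrefl g)
          · exact hle
        exact List.pairwise_map.2 h1
    simp only [Function.comp_apply, hsorted, ← hbf]
  rw [List.map_congr_left hid]
  simp
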